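-- pv_equiv track=rewrite | github.com/IldikoPilan/feedback_pub | process_annot.py | sum_annot_data
-- ===== SOURCE A (Python) =====
-- def prep_iaa_data(all_annotations):
--     # Returns a list of (annotator, item, label) tuples.
--     # NLTK AnnotationTask input data format.
--     iaa_data = []
--     for ix, annotations in enumerate(all_annotations):
--         annotator_id = "a" + str(ix+1)
--         for annotation_item, label in annotations.items():
--             iaa_data.append((annotator_id, annotation_item, label))
--     return iaa_data
--
-- def sum_annot_data(all_annotations):
--     """ Collects annotation labels per item from all annotators.
--     Returns a dictionary with annotation item id as key and a
--     list of annotation labels assigned by all annotators.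
--     """
--     iaa_data = prep_iaa_data(all_annotations)
--     data = {}
--     for (annotator, item, label) in iaa_data:
--         if label not in ["same", "rem", "skip", "-", ""]:
--             if item in data:
--                 data[item].append(label)
--             else:
--                 data[item] = [label]
--     return data
-- ===== SOURCE B (Python) =====
-- # Single fused pass over the annotator dicts; no intermediate tuple list, no annotator ids.
-- _SPECIAL = {"same", "rem", "skip", "-", ""}
--
-- def sum_annot_data(all_annotations):
--     data = {}
--     for annotations in all_annotations:
--         for item, label in annotations.items():
--             if label in _SPECIAL:
--                 continue
--             data.setdefault(item, []).append(label)
--     return data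
-- ===== Notes on version B (the rewrite author's own statement) =====
-- stated objective: simpler
-- what changed: B drops the prep_iaa_data helper and the intermediate (annotator, item, label) tuple list entirely: one fused nested pass over the annotator dicts appends each kept label via dict.setdefault, never materialising annotator ids.
import Mathlib
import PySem

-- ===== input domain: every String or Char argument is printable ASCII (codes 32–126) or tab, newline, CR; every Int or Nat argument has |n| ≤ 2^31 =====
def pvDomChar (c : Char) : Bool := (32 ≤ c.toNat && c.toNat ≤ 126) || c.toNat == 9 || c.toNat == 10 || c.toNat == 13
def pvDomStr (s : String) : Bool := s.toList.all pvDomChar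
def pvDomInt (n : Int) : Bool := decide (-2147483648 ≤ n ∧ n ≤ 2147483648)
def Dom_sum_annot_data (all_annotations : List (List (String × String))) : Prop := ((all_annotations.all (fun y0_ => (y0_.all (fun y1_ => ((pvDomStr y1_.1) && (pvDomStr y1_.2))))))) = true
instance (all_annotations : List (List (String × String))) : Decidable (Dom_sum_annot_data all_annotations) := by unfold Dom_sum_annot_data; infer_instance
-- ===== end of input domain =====

-- B fuses A's two passes (build all (annotator, item, label) triples, then aggregate) into one
-- nested pass over the annotator dicts with dict.setdefault, never building the tuple list or
-- the annotator ids; objective: simpler.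

-- ===== PORT A =====
-- dict arguments are assoc lists; the Python dict is their PySem.Dict.ofList normalisation.
def prep_iaa_data (all_annotations : List (List (String × String))) :
    List (String × String × String) :=
  (PySem.List.enumerate all_annotations).foldl
    (fun iaa_data p =>
      let annotator_id := "a" ++ PySem.Int.toStr (p.1 + 1)
      (PySem.Dict.ofList p.2).items.foldl
        (fun acc q => acc ++ [(annotator_id, q.1, q.2)]) iaa_data)
    []

def sum_annot_data (all_annotations : List (List (String × String))) :
    List (String × List String) :=
  ((prep_iaa_data all_annotations).foldl
    (fun data t =>
      if t.2.2 ∈ ["same", "rem", "skip", "-", ""] then data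
      else if data.contains t.2.1 then data.modify t.2.1 [] (· ++ [t.2.2])
      else data.insert t.2.1 [t.2.2])
    PySem.Dict.empty).items

-- ===== PORT B =====
def sum_annot_data_alt (all_annotations : List (List (String × String))) :
    List (String × List String) :=
  (all_annotations.foldl
    (fun data annotations =>
      (PySem.Dict.ofList annotations).items.foldl
        (fun data q =>
          if q.2 ∈ ["same", "rem", "skip", "-", ""] then data
          else (data.setdefault q.1 []).modify q.1 [] (· ++ [q.2]))
        data)
    PySem.Dict.empty).items

-- ===== PRECONDITION & SPEC =====
def Spec_sum_annot_data (all_annotations : List (List (String × String))) (out : List (String × List String)) : Prop := out = sum_annot_data_alt all_annotations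
instance (all_annotations : List (List (String × String))) (out : List (String × List String)) : Decidable (Spec_sum_annot_data all_annotations out) := by unfold Spec_sum_annot_data; infer_instance

-- ===== CLAIM (what is proved, stated in full; the proofs are below) =====
def Claim_equal_sum_annot_data : Prop := ∀ (all_annotations : List (List (String × String))), Dom_sum_annot_data all_annotations → Spec_sum_annot_data all_annotations (sum_annot_data all_annotations)

-- ===== LEMMAS AND PROOFS =====

-- A's per-triple dict step (annotator id dropped) equals B's per-pair dict step.
theorem step_eq (d : PySem.Dict String (List String)) (q : String × String) :
    (if q.2 ∈ ["same", "rem", "skip", "-", ""] then d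
     else if d.contains q.1 then d.modify q.1 [] (· ++ [q.2])
     else d.insert q.1 [q.2]) =
    (if q.2 ∈ ["same", "rem", "skip", "-", ""] then d
     else (d.setdefault q.1 []).modify q.1 [] (· ++ [q.2])) := by
  by_cases hs : q.2 ∈ ["same", "rem", "skip", "-", ""]
  · simp [hs]
  · by_cases hc : d.contains q.1 = true
    · rw [if_neg hs, if_neg hs, if_pos hc,
        PySem.Dict.setdefault_of_contains d ([] : List String) hc]
    · rw [if_neg hs, if_neg hs, if_neg hc,
        PySem.Dict.setdefault_of_not_contains d ([] : List String) (by simpa using hc)]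
      simp [PySem.Dict.modify, PySem.Dict.getD_insert_self,
        PySem.Dict.insert_insert_self]

theorem inner_eq (l : List (String × String)) (aid : String)
    (d : PySem.Dict String (List String))
    (acc : List (String × String × String)) :
    ((l.foldl (fun acc q => acc ++ [(aid, q.1, q.2)]) acc).foldl
      (fun data t =>
        if t.2.2 ∈ ["same", "rem", "skip", "-", ""] then data
        else if data.contains t.2.1 then data.modify t.2.1 [] (· ++ [t.2.2])
        else data.insert t.2.1 [t.2.2]) d) =
    (l.foldl
      (fun data q =>
        if q.2 ∈ ["same", "rem", "skip", "-", ""] then data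
        else (data.setdefault q.1 []).modify q.1 [] (· ++ [q.2]))
      (acc.foldl
        (fun data t =>
          if t.2.2 ∈ ["same", "rem", "skip", "-", ""] then data
          else if data.contains t.2.1 then data.modify t.2.1 [] (· ++ [t.2.2])
          else data.insert t.2.1 [t.2.2]) d)) := by
  induction l generalizing acc with
  | nil => rfl
  | cons q l ih =>
      simp only [List.foldl_cons]
      rw [ih, List.foldl_append]
      simp only [List.foldl_cons, List.foldl_nil]
      congr 1
      exact step_eq _ q

theorem outer_eq (L : List (Int × List (String × String)))
    (d : PySem.Dict String (List String))
    (acc : List (String × String × String)) :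
    ((L.foldl
        (fun iaa_data p =>
          let annotator_id := "a" ++ PySem.Int.toStr (p.1 + 1)
          (PySem.Dict.ofList p.2).items.foldl
            (fun acc q => acc ++ [(annotator_id, q.1, q.2)]) iaa_data)
        acc).foldl
      (fun data t =>
        if t.2.2 ∈ ["same", "rem", "skip", "-", ""] then data
        else if data.contains t.2.1 then data.modify t.2.1 [] (· ++ [t.2.2])
        else data.insert t.2.1 [t.2.2]) d) =
    (L.foldl
      (fun data p =>
        (PySem.Dict.ofList p.2).items.foldl
          (fun data q =>
            if q.2 ∈ ["same", "rem", "skip", "-", ""] then data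
            else (data.setdefault q.1 []).modify q.1 [] (· ++ [q.2]))
          data)
      (acc.foldl
        (fun data t =>
          if t.2.2 ∈ ["same", "rem", "skip", "-", ""] then data
          else if data.contains t.2.1 then data.modify t.2.1 [] (· ++ [t.2.2])
          else data.insert t.2.1 [t.2.2]) d)) := by
  induction L generalizing acc with
  | nil => rfl
  | cons p L ih =>
      simp only [List.foldl_cons]
      rw [ih, inner_eq]

-- ===== VERDICT (by name: the statement is the Claim_ definition above) =====
theorem sum_annot_data_spec : Claim_equal_sum_annot_data := by
  intro all _
  unfold Spec_sum_annot_data sum_annot_data sum_annot_data_alt prep_iaa_data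
  rw [outer_eq]
  congr 1
  have h := PySem.List.map_snd_enumerate all (0 : Int)
  calc (PySem.List.enumerate all 0).foldl
        (fun data p =>
          (PySem.Dict.ofList p.2).items.foldl
            (fun data q =>
              if q.2 ∈ ["same", "rem", "skip", "-", ""] then data
              else (data.setdefault q.1 []).modify q.1 [] (· ++ [q.2])) data)
        PySem.Dict.empty
      = ((PySem.List.enumerate all 0).map (·.2)).foldl
        (fun data ann =>
          (PySem.Dict.ofList ann).items.foldl
            (fun data q =>
              if q.2 ∈ ["same", "rem", "skip", "-", ""] then data
              else (data.setdefault q.1 []).modify q.1 [] (· ++ [q.2])) data)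
        PySem.Dict.empty := by rw [List.foldl_map]
    _ = _ := by rw [h]
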